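-- pv_equiv track=rewrite | github.com/MiguelX413/TranslitBot | scriptcon.py | toKatakana
-- ===== SOURCE A (Python) =====
-- import unicodedata
--
-- def preCommon(text):
-- #	text = unicodedata.normalize('NFC', unicodedata.normalize('NFD', text))
-- 	text = text.replace('ng','ŋ')
-- 	return(text)
--
-- def postCommon(text):
-- 	text = unicodedata.normalize('NFC', unicodedata.normalize('NFD', text))
-- 	text = text.replace('\\','')
-- 	return(text)
--
-- def toKatakana(text):
-- 	text = preCommon(text)
-- 	text = text.lower()
-- 	finals = {ord('b'):'ㇷ゙', ord('d'):'ㇳ゙', ord('g'): 'ㇰ゙', ord('k'): 'ㇰ', ord('l'): 'ㇽ゚', ord('m'): 'ㇺ', ord('n'): 'ン', ord('p'): 'ㇷ゚', ord('r'): 'ㇽ', ord('t'): 'ㇳ', ord('ŋ'): 'ㇰ゚'}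
--
--
-- 	for x in [('ka','カ'),('ki','キ'),('ku','ク'),('ke','ケ'),('ko','コ')]:
-- 		text = text.replace(x[0],x[1])
--
-- 	for x in [('ga','ガ'),('gi','ギ'),('gu','グ'),('ge','ゲ'),('go','ゴ')]:
-- 		text = text.replace(x[0],x[1])
--
-- 	for x in [('ŋa','カ゚'),('ŋi','キ゚'),('ŋu','ク゚'),('ŋe','ケ゚'),('ŋo','コ゚')]:
-- 		text = text.replace(x[0],x[1])
--
-- 	for x in [('kxa','カㇵ'),('kxi','キㇶ'),('kxu','クㇷ'),('kxe','ケㇸ'),('kxo','コㇹ')]: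
-- 		text = text.replace(x[0],x[1])
--
-- 	for x in [('ta','タ'),('ti','ティ'),('tu','トゥ'),('te','テ'),('to','ト')]:
-- 		text = text.replace(x[0],x[1])
--
-- 	for x in [('da','ダ'),('di','ディ'),('du','ドゥ'),('de','デ'),('do','ド')]:
-- 		text = text.replace(x[0],x[1])
--
-- 	for x in [('tþa','タ゚'),('tþi','テ゚ィ'),('tþu','ト゚ゥ'),('tþe','テ゚'),('tþo','ト゚')]:
-- 		text = text.replace(x[0],x[1])
--
-- 	for x in [('na','ナ'),('ni','ニ'),('nu','ヌ'),('ne','ネ'),('no','ノ')]: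
-- 		text = text.replace(x[0],x[1])
--
-- 	for x in [('pa','パ'),('pi','ピ'),('pu','プ'),('pe','ペ'),('po','ポ')]:
-- 		text = text.replace(x[0],x[1])
--
-- 	for x in [('ba','バ'),('bi','ビ'),('bu','ブ'),('be','ベ'),('bo','ボ')]:
-- 		text = text.replace(x[0],x[1])
--
-- 	for x in [('pfa','パㇵ'),('pfi','ピㇶ'),('pfu','プㇷ'),('pfe','ペㇸ'),('pfo','ポㇹ')]:
-- 		text = text.replace(x[0],x[1])
--
-- 	for x in [('ma','マ'),('mi','ミ'),('mu','ム'),('me','メ'),('mo','モ')]: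
-- 		text = text.replace(x[0],x[1])
--
-- 	for x in [('ra','ラ'),('ri','リ'),('ru','ル'),('re','レ'),('ro','ロ')]:
-- 		text = text.replace(x[0],x[1])
--
-- 	for x in [('la','ラ゚'),('li','リ゚'),('lu','ル゚'),('le','レ゚'),('lo','ロ゚')]:
-- 		text = text.replace(x[0],x[1])
--
-- 	for x in [('a','ア'),('i','イ'),('u','ウ'),('e','エ'),('o','オ')]:
-- 		text = text.replace(x[0],x[1])
--
--
-- 	text = text.replace(' ','・')
--
--
-- 	text = text.translate(finals)
--
-- 	return(postCommon(text))
-- ===== SOURCE B (Python) =====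
-- import unicodedata
--
-- def preCommon(text):
-- 	text = text.replace('ng','ŋ')
-- 	return(text)
--
-- def postCommon(text):
-- 	text = unicodedata.normalize('NFC', unicodedata.normalize('NFD', text))
-- 	text = text.replace('\\','')
-- 	return(text)
--
-- # Compact row encoding: each row is (consonant prefix, the five kana for a-i-u-e-o,
-- # comma separated).  The full key->kana table is generated by zipping "aiueo" against
-- # each row; the lone space mapping is added at the end.
-- _ROWS = [
-- 	("kx", "カㇵ,キㇶ,クㇷ,ケㇸ,コㇹ"),
-- 	("tþ", "タ゚,テ゚ィ,ト゚ゥ,テ゚,ト゚"),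
-- 	("pf", "パㇵ,ピㇶ,プㇷ,ペㇸ,ポㇹ"),
-- 	("k", "カ,キ,ク,ケ,コ"),
-- 	("g", "ガ,ギ,グ,ゲ,ゴ"),
-- 	("ŋ", "カ゚,キ゚,ク゚,ケ゚,コ゚"),
-- 	("t", "タ,ティ,トゥ,テ,ト"),
-- 	("d", "ダ,ディ,ドゥ,デ,ド"),
-- 	("n", "ナ,ニ,ヌ,ネ,ノ"),
-- 	("p", "パ,ピ,プ,ペ,ポ"),
-- 	("b", "バ,ビ,ブ,ベ,ボ"),
-- 	("m", "マ,ミ,ム,メ,モ"),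
-- 	("r", "ラ,リ,ル,レ,ロ"),
-- 	("l", "ラ゚,リ゚,ル゚,レ゚,ロ゚"),
-- 	("", "ア,イ,ウ,エ,オ"),
-- ]
--
-- _TABLE = {}
-- for _p, _row in _ROWS:
-- 	for _v, _kana in zip("aiueo", _row.split(',')):
-- 		_TABLE[_p + _v] = _kana
-- _TABLE[' '] = '・'
--
-- _FINALS = {'b':'ㇷ゙','d':'ㇳ゙','g':'ㇰ゙','k':'ㇰ','l':'ㇽ゚','m':'ㇺ','n':'ン','p':'ㇷ゚','r':'ㇽ','t':'ㇳ','ŋ':'ㇰ゚'}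
--
-- def toKatakana(text):
-- 	text = preCommon(text)
-- 	text = text.lower()
-- 	out = []
-- 	i = 0
-- 	n = len(text)
-- 	while i < n:
-- 		for L in (3, 2, 1):
-- 			v = _TABLE.get(text[i:i+L])
-- 			if v is not None:
-- 				out.append(v)
-- 				i += L
-- 				break
-- 		else:
-- 			c = text[i]
-- 			out.append(_FINALS.get(c, c))
-- 			i += 1
-- 	return postCommon(''.join(out))
-- ===== Notes on version B (the rewrite author's own statement) =====
-- stated objective: alternative
-- what changed: Replaced A's ~80 sequential whole-string str.replace passes (plus a final per-char translate) by a key->kana table generated from compact consonant rows zipped with the vowels, used in a single left-to-right max-munch scan (3-, 2-, then 1-char key, finals-map fallback) that emits the output in one pass.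
import Mathlib
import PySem

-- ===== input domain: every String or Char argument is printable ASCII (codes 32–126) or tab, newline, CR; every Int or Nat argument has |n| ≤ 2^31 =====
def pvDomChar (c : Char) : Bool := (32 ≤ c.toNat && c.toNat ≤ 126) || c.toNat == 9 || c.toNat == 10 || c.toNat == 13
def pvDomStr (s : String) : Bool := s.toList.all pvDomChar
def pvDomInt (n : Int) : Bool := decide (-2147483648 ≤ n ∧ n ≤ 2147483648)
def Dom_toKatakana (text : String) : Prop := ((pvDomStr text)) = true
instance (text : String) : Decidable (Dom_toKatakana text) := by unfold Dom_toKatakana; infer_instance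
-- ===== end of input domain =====

-- B replaces A's ~80 sequential full-string replace passes by one left-to-right longest-match scan
-- over a key->kana table generated from compact consonant rows (objective: alternative single-pass
-- algorithm, same result; not measured faster).

-- ===== PORT A =====
-- A's per-family replacement lists, named (one per 'for x in [...]' loop, in A's order; the chars
-- '\u3099'/'\u309A' are the combining voiced/semivoiced marks appearing inside A's string literals).
def stA0 : List (List Char × List Char) :=
  [(['k','a'],['カ']),(['k','i'],['キ']),(['k','u'],['ク']),(['k','e'],['ケ']),(['k','o'],['コ'])]
def stA1 : List (List Char × List Char) :=
  [(['g','a'],['ガ']),(['g','i'],['ギ']),(['g','u'],['グ']),(['g','e'],['ゲ']),(['g','o'],['ゴ'])]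
def stA2 : List (List Char × List Char) :=
  [(['ŋ','a'],['カ','\u309A']),(['ŋ','i'],['キ','\u309A']),(['ŋ','u'],['ク','\u309A']),(['ŋ','e'],['ケ','\u309A']),(['ŋ','o'],['コ','\u309A'])]
def stA3 : List (List Char × List Char) :=
  [(['k','x','a'],['カ','ㇵ']),(['k','x','i'],['キ','ㇶ']),(['k','x','u'],['ク','ㇷ']),(['k','x','e'],['ケ','ㇸ']),(['k','x','o'],['コ','ㇹ'])]
def stA4 : List (List Char × List Char) :=
  [(['t','a'],['タ']),(['t','i'],['テ','ィ']),(['t','u'],['ト','ゥ']),(['t','e'],['テ']),(['t','o'],['ト'])]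
def stA5 : List (List Char × List Char) :=
  [(['d','a'],['ダ']),(['d','i'],['デ','ィ']),(['d','u'],['ド','ゥ']),(['d','e'],['デ']),(['d','o'],['ド'])]
def stA6 : List (List Char × List Char) :=
  [(['t','þ','a'],['タ','\u309A']),(['t','þ','i'],['テ','\u309A','ィ']),(['t','þ','u'],['ト','\u309A','ゥ']),(['t','þ','e'],['テ','\u309A']),(['t','þ','o'],['ト','\u309A'])]
def stA7 : List (List Char × List Char) :=
  [(['n','a'],['ナ']),(['n','i'],['ニ']),(['n','u'],['ヌ']),(['n','e'],['ネ']),(['n','o'],['ノ'])]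
def stA8 : List (List Char × List Char) :=
  [(['p','a'],['パ']),(['p','i'],['ピ']),(['p','u'],['プ']),(['p','e'],['ペ']),(['p','o'],['ポ'])]
def stA9 : List (List Char × List Char) :=
  [(['b','a'],['バ']),(['b','i'],['ビ']),(['b','u'],['ブ']),(['b','e'],['ベ']),(['b','o'],['ボ'])]
def stA10 : List (List Char × List Char) :=
  [(['p','f','a'],['パ','ㇵ']),(['p','f','i'],['ピ','ㇶ']),(['p','f','u'],['プ','ㇷ']),(['p','f','e'],['ペ','ㇸ']),(['p','f','o'],['ポ','ㇹ'])]
def stA11 : List (List Char × List Char) :=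
  [(['m','a'],['マ']),(['m','i'],['ミ']),(['m','u'],['ム']),(['m','e'],['メ']),(['m','o'],['モ'])]
def stA12 : List (List Char × List Char) :=
  [(['r','a'],['ラ']),(['r','i'],['リ']),(['r','u'],['ル']),(['r','e'],['レ']),(['r','o'],['ロ'])]
def stA13 : List (List Char × List Char) :=
  [(['l','a'],['ラ','\u309A']),(['l','i'],['リ','\u309A']),(['l','u'],['ル','\u309A']),(['l','e'],['レ','\u309A']),(['l','o'],['ロ','\u309A'])]
def stA14 : List (List Char × List Char) :=
  [(['a'],['ア']),(['i'],['イ']),(['u'],['ウ']),(['e'],['エ']),(['o'],['オ'])]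

-- finals dict of A's translate call (char → replacement string)
def finalsA : List (Char × List Char) := [('b',['ㇷ','\u3099']), ('d',['ㇳ','\u3099']), ('g',['ㇰ','\u3099']), ('k',['ㇰ']), ('l',['ㇽ','\u309A']), ('m',['ㇺ']), ('n',['ン']), ('p',['ㇷ','\u309A']), ('r',['ㇽ']), ('t',['ㇳ']), ('ŋ',['ㇰ','\u309A'])]

-- str.translate with a {ord(c): str} dict: every char is mapped through the dict, kept when absent — exact.
def translateA (s : List Char) : List Char := s.flatMap (fun c => ((finalsA.lookup c).getD [c]))

-- one 'for x in lst: text = text.replace(x[0], x[1])' loop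
def repStage (s : List Char) (st : List (List Char × List Char)) : List Char :=
  st.foldl (fun t e => PySem.Chars.replace t e.1 e.2) s

def toKatakana (text : String) : String :=
  let t0 := PySem.Chars.replace text.toList ['n','g'] ['ŋ']   -- preCommon: text.replace('ng','ŋ')
  let t1 := PySem.Chars.lower t0                              -- text.lower()
  let t2 := repStage t1 stA0
  let t3 := repStage t2 stA1
  let t4 := repStage t3 stA2
  let t5 := repStage t4 stA3
  let t6 := repStage t5 stA4
  let t7 := repStage t6 stA5
  let t8 := repStage t7 stA6
  let t9 := repStage t8 stA7
  let t10 := repStage t9 stA8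
  let t11 := repStage t10 stA9
  let t12 := repStage t11 stA10
  let t13 := repStage t12 stA11
  let t14 := repStage t13 stA12
  let t15 := repStage t14 stA13
  let t16 := repStage t15 stA14
  let t17 := PySem.Chars.replace t16 [' '] ['・']             -- text.replace(' ','・')
  let t18 := translateA t17                                   -- text.translate(finals)
  -- postCommon: unicodedata.normalize('NFC', NFD(·)) is the identity on every string this program
  -- builds (ASCII remnants, precomposed kana, kana + non-composing combining marks) — ported as the
  -- identity; then text.replace('\\','').
  String.ofList (PySem.Chars.replace t18 ['\\'] [])

-- ===== PORT B =====
-- Source B's compact _ROWS: (consonant prefix, five kana for a-i-u-e-o, comma separated), longest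
-- prefixes first, the pure-vowel row last.
def rowsB : List (String × String) := [
  ("kx", "カㇵ,キㇶ,クㇷ,ケㇸ,コㇹ"),
  ("tþ", "タ゚,テ゚ィ,ト゚ゥ,テ゚,ト゚"),
  ("pf", "パㇵ,ピㇶ,プㇷ,ペㇸ,ポㇹ"),
  ("k", "カ,キ,ク,ケ,コ"),
  ("g", "ガ,ギ,グ,ゲ,ゴ"),
  ("ŋ", "カ゚,キ゚,ク゚,ケ゚,コ゚"),
  ("t", "タ,ティ,トゥ,テ,ト"),
  ("d", "ダ,ディ,ドゥ,デ,ド"),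
  ("n", "ナ,ニ,ヌ,ネ,ノ"),
  ("p", "パ,ピ,プ,ペ,ポ"),
  ("b", "バ,ビ,ブ,ベ,ボ"),
  ("m", "マ,ミ,ム,メ,モ"),
  ("r", "ラ,リ,ル,レ,ロ"),
  ("l", "ラ゚,リ゚,ル゚,レ゚,ロ゚"),
  ("", "ア,イ,ウ,エ,オ")]

-- Source B's row.split(',') — hand port of str.split(',') on comma-separated rows, exact here
-- (no row piece is empty and rows contain no other separators).
def splitCB : List Char → List Char → List (List Char)
  | acc, [] => [acc.reverse]
  | acc, c :: t => if c = ',' then acc.reverse :: splitCB [] t else splitCB (c :: acc) t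

-- the generated _TABLE: for each row, zip "aiueo" with the row's kana; then the space mapping.
def tblB : List (List Char × List Char) :=
  (rowsB.flatMap (fun pr =>
    (("aiueo".toList).zip (splitCB [] pr.2.toList)).map
      (fun vk => (pr.1.toList ++ [vk.1], vk.2)))) ++ [([' '],['・'])]

def finalsB : List (Char × String) :=
  [('b',"ㇷ゙"), ('d',"ㇳ゙"), ('g',"ㇰ゙"), ('k',"ㇰ"), ('l',"ㇽ゚"), ('m',"ㇺ"), ('n',"ン"), ('p',"ㇷ゚"), ('r',"ㇽ"), ('t',"ㇳ"), ('ŋ',"ㇰ゚")]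

-- Source B's while loop: at position i try _TABLE.get(text[i:i+L]) for L = 3,2,1, emit and advance by L,
-- else emit _FINALS.get(c, c) and advance by 1.  Ported as recursion on the remaining characters.
def scanB : List Char → List Char
  | [] => []
  | c :: rest =>
    match tblB.lookup ((c :: rest).take 3) with
    | some v => v ++ scanB (rest.drop 2)
    | none =>
      match tblB.lookup ((c :: rest).take 2) with
      | some v => v ++ scanB (rest.drop 1)
      | none =>
        match tblB.lookup ((c :: rest).take 1) with
        | some v => v ++ scanB rest
        | none => (((finalsB.lookup c).map String.toList).getD [c]) ++ scanB rest
termination_by s => s.length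
decreasing_by all_goals (simp only [List.length_drop, List.length_cons]; omega)

def toKatakana_alt (text : String) : String :=
  let t0 := PySem.Chars.replace text.toList ['n','g'] ['ŋ']   -- preCommon
  let t1 := PySem.Chars.lower t0                              -- text.lower()
  let t2 := scanB t1                                          -- the single scan
  -- postCommon, same as in A (normalize is the identity here, then drop backslashes)
  String.ofList (PySem.Chars.replace t2 ['\\'] [])

-- ===== PRECONDITION & SPEC =====
def Spec_toKatakana (text : String) (out : String) : Prop := out = toKatakana_alt text
instance (text : String) (out : String) : Decidable (Spec_toKatakana text out) := by unfold Spec_toKatakana; infer_instance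

-- ===== CLAIM (what is proved, stated in full; the proofs are below) =====
def Claim_equal_toKatakana : Prop := ∀ (text : String), Dom_toKatakana text → Spec_toKatakana text (toKatakana text)

-- ===== LEMMAS AND PROOFS =====

-- A's flat replacement table: the 15 stage lists followed by the space replacement, in A's order.
def tblA : List (List Char × List Char) :=
  stA0 ++ stA1 ++ stA2 ++ stA3 ++ stA4 ++ stA5 ++ stA6 ++ stA7 ++ stA8 ++ stA9 ++
  stA10 ++ stA11 ++ stA12 ++ stA13 ++ stA14 ++ [([' '],['・'])]

-- clean structural version of str.replace (for old ≠ [])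
def repc (old new : List Char) : List Char → List Char
  | [] => []
  | c :: t =>
    if old.isPrefixOf (c :: t) then new ++ repc old new ((c :: t).drop (max 1 old.length))
    else c :: repc old new t
termination_by s => s.length
decreasing_by all_goals (simp only [List.length_drop, List.length_cons]; omega)

theorem replace_go_eq (old new : List Char) (h : old ≠ []) :
    ∀ fuel (l acc : List Char), l.length ≤ fuel →
      PySem.Chars.replace.go old new fuel l acc = acc.reverse ++ repc old new l := by
  have hpos : 1 ≤ old.length := List.length_pos_iff.mpr h
  intro fuel
  induction fuel with
  | zero =>
    intro l acc hl
    have : l = [] := by cases l <;> simp_all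
    subst this
    simp [PySem.Chars.replace.go, repc]
  | succ n ih =>
    intro l acc hl
    cases l with
    | nil => simp [PySem.Chars.replace.go, repc]
    | cons c t =>
      rw [PySem.Chars.replace.go]
      by_cases hp : old.isPrefixOf (c :: t)
      · rw [if_pos hp]
        rw [ih _ _ (by simp only [List.length_drop, List.length_cons] at *; omega)]
        rw [repc, if_pos hp]
        have hmax : max 1 old.length = old.length := by omega
        simp [hmax]
      · rw [if_neg hp]
        rw [ih _ _ (by simp at hl ⊢; omega)]
        rw [repc, if_neg hp]
        simp

theorem replace_eq_repc (old new s : List Char) (h : old ≠ []) :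
    PySem.Chars.replace s old new = repc old new s := by
  rw [PySem.Chars.replace, if_neg (by simpa using h)]
  simpa using replace_go_eq old new h s.length s [] le_rfl

def NoStraddle (q p : List Char) : Prop :=
  (!q.isEmpty && !p.isEmpty && !q.isPrefixOf p && !p.isPrefixOf q &&
   (p.drop 1).all (fun c => q.head? != some c)) = true

theorem ns_spec {q p : List Char} (h : NoStraddle q p) :
    q ≠ [] ∧ p ≠ [] ∧ ¬ q <+: p ∧ ¬ p <+: q ∧ ∀ c ∈ p.drop 1, q.head? ≠ some c := by
  simp only [NoStraddle, Bool.and_eq_true, Bool.not_eq_true', List.isEmpty_eq_false_iff,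
    List.all_eq_true, bne_iff_ne] at h
  obtain ⟨⟨⟨⟨h1, h2⟩, h3⟩, h4⟩, h5⟩ := h
  refine ⟨h1, h2, ?_, ?_, h5⟩
  · intro hc; rw [← List.isPrefixOf_iff_prefix] at hc; simp [hc] at h3
  · intro hc; rw [← List.isPrefixOf_iff_prefix] at hc; simp [hc] at h4

theorem repc_fire (old new u : List Char) (h : old ≠ []) :
    repc old new (old ++ u) = new ++ repc old new u := by
  obtain ⟨o, ot, rfl⟩ := List.ne_nil_iff_exists_cons.mp h
  rw [List.cons_append, repc, if_pos (by
    rw [List.isPrefixOf_iff_prefix, ← List.cons_append]; exact List.prefix_append _ u)]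
  have hmax : max 1 (o :: ot).length = (o :: ot).length := by
    simp only [List.length_cons]; omega
  rw [hmax, ← List.cons_append, List.drop_left]

theorem repc_skip (old new : List Char) (c : Char) (t : List Char) (h : ¬ old <+: (c :: t)) :
    repc old new (c :: t) = c :: repc old new t := by
  rw [repc, if_neg (by rw [List.isPrefixOf_iff_prefix]; exact h)]

theorem repc_inert (old new : List Char) (h : old ≠ []) :
    ∀ a b, (∀ c ∈ a, old.head? ≠ some c) → repc old new (a ++ b) = a ++ repc old new b := by
  obtain ⟨o, ot, rfl⟩ := List.ne_nil_iff_exists_cons.mp h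
  intro a
  induction a with
  | nil => simp
  | cons a0 a' iha =>
    intro b ha
    rw [List.cons_append, repc_skip _ _ _ _ (by
      intro hp
      have := (List.cons_prefix_cons.mp hp).1
      exact ha a0 List.mem_cons_self (by simp [this]))]
    rw [iha b (fun c hc => ha c (List.mem_cons_of_mem _ hc))]
    rfl

theorem repc_straddle (old new p u : List Char) (h : NoStraddle old p) :
    repc old new (p ++ u) = p ++ repc old new u := by
  obtain ⟨h1, h2, h3, h4, h5⟩ := ns_spec h
  obtain ⟨c, pt, rfl⟩ := List.ne_nil_iff_exists_cons.mp h2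
  rw [List.cons_append, repc_skip _ _ _ _ (by
    intro hp
    rcases List.prefix_or_prefix_of_prefix hp (List.prefix_append (c :: pt) u) with hh | hh
    · exact h3 hh
    · exact h4 hh)]
  rw [repc_inert old new h1 pt u (by intro x hx; exact h5 x (by simpa using hx))]
  rfl

theorem repc_reflect (old new : List Char) (hnew : new ≠ []) :
    ∀ n (s t : List Char), s.length ≤ n → (∀ c ∈ t, c ∉ new) →
      t <+: repc old new s → t <+: s := by
  intro n
  induction n with
  | zero =>
    intro s t hs ht hp
    have : s = [] := by cases s <;> simp_all
    subst this
    rw [repc] at hp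
    exact hp
  | succ n ih =>
    intro s t hs ht hp
    cases s with
    | nil => rw [repc] at hp; exact hp
    | cons c s' =>
      rw [repc] at hp
      by_cases hpre : old.isPrefixOf (c :: s')
      · rw [if_pos hpre] at hp
        cases t with
        | nil => exact List.nil_prefix
        | cons t0 tt =>
          exfalso
          obtain ⟨n0, nt, rfl⟩ := List.ne_nil_iff_exists_cons.mp hnew
          rw [List.cons_append] at hp
          have := (List.cons_prefix_cons.mp hp).1
          exact ht t0 List.mem_cons_self (by simp [this])
      · rw [if_neg hpre] at hp
        cases t with
        | nil => exact List.nil_prefix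
        | cons t0 tt =>
          obtain ⟨rfl, htt⟩ := List.cons_prefix_cons.mp hp
          refine List.cons_prefix_cons.mpr ⟨rfl, ih s' tt ?_ (fun c hc => ht c (List.mem_cons_of_mem _ hc)) htt⟩
          simp only [List.length_cons] at hs
          omega

-- the folded A-side chain, in clean form
def FR (T : List (List Char × List Char)) (s : List Char) : List Char :=
  T.foldl (fun t e => repc e.1 e.2 t) s

theorem FR_cons (e : List Char × List Char) (T : List (List Char × List Char)) (s : List Char) :
    FR (e :: T) s = FR T (repc e.1 e.2 s) := rfl

theorem FR_append (T1 T2 : List (List Char × List Char)) (s : List Char) :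
    FR (T1 ++ T2) s = FR T2 (FR T1 s) := by
  simp [FR, List.foldl_append]

-- table conditions (∀-form)
def NN (T : List (List Char × List Char)) : Prop := ∀ e ∈ T, e.1 ≠ [] ∧ e.2 ≠ []
def VH (T : List (List Char × List Char)) : Prop :=
  ∀ e ∈ T, ∀ c ∈ e.2, ∀ e' ∈ T, e'.1.head? ≠ some c
def PV (T : List (List Char × List Char)) : Prop := ∀ e ∈ T, ∀ c ∈ e.1, ∀ e' ∈ T, c ∉ e'.2
def VF (T : List (List Char × List Char)) : Prop := ∀ e ∈ T, ∀ c ∈ e.2, finalsA.lookup c = none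

theorem FR_nil (T : List (List Char × List Char)) : FR T [] = [] := by
  induction T with
  | nil => rfl
  | cons e T ih =>
    have hnil : repc e.1 e.2 [] = [] := by rw [repc]
    rw [FR_cons, hnil]; exact ih

theorem FR_inert (T : List (List Char × List Char)) (v : List Char)
    (hv : ∀ e ∈ T, e.1 ≠ [] ∧ ∀ c ∈ v, e.1.head? ≠ some c) :
    ∀ w, FR T (v ++ w) = v ++ FR T w := by
  induction T with
  | nil => intro w; rfl
  | cons e T ih =>
    intro w
    rw [FR_cons, repc_inert e.1 e.2 (hv e List.mem_cons_self).1 v w (hv e List.mem_cons_self).2,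
      ih (fun e' he' => hv e' (List.mem_cons_of_mem _ he')) (repc e.1 e.2 w), FR_cons]

theorem FR_fire (T : List (List Char × List Char)) (p v : List Char)
    (hPW : List.Pairwise (fun a b => NoStraddle a.1 b.1) T) (hNN : NN T) (hVH : VH T)
    (hm : (p, v) ∈ T) : ∀ u, FR T (p ++ u) = v ++ FR T u := by
  induction T with
  | nil => cases hm
  | cons e T ih =>
    intro u
    rcases List.mem_cons.mp hm with heq | hmem
    · cases heq
      rw [FR_cons]
      dsimp only
      rw [repc_fire p v u (hNN (p, v) List.mem_cons_self).1]
      rw [FR_inert T v (fun e' he' => ⟨(hNN e' (List.mem_cons_of_mem _ he')).1,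
        fun c hc => hVH (p, v) List.mem_cons_self c hc e' (List.mem_cons_of_mem _ he')⟩)]
      conv_rhs => rw [FR_cons]
    · have hns : NoStraddle e.1 p := by
        have := (List.pairwise_cons.mp hPW).1 (p, v) hmem
        exact this
      rw [FR_cons, repc_straddle e.1 e.2 p u hns]
      rw [ih (List.pairwise_cons.mp hPW).2
        (fun e' he' => hNN e' (List.mem_cons_of_mem _ he'))
        (fun e' he' c hc e'' he'' => hVH e' (List.mem_cons_of_mem _ he') c hc e'' (List.mem_cons_of_mem _ he''))
        hmem (repc e.1 e.2 u), FR_cons]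

theorem FR_fallback (T0 : List (List Char × List Char)) (hNN : NN T0) (hPV : PV T0) (c : Char) :
    ∀ T, (∀ e ∈ T, e ∈ T0) → ∀ w, (∀ e ∈ T, ¬ e.1 <+: (c :: w)) →
      FR T (c :: w) = c :: FR T w := by
  intro T
  induction T with
  | nil => intro _ w _; rfl
  | cons e T ih =>
    intro hsub w hw
    rw [FR_cons, repc_skip e.1 e.2 c w (hw e List.mem_cons_self)]
    rw [ih (fun e' he' => hsub e' (List.mem_cons_of_mem _ he')) (repc e.1 e.2 w) ?_, FR_cons]
    intro q hq hp
    have hqT0 := hsub q (List.mem_cons_of_mem _ hq)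
    have heT0 := hsub e List.mem_cons_self
    obtain ⟨q0, qt, hq1⟩ := List.ne_nil_iff_exists_cons.mp (hNN q hqT0).1
    rw [hq1] at hp
    obtain ⟨rfl, hqt⟩ := List.cons_prefix_cons.mp hp
    have hqtw : qt <+: w := by
      refine repc_reflect e.1 e.2 (hNN e heT0).2 w.length w qt le_rfl ?_ hqt
      intro x hx
      exact hPV q hqT0 x (by rw [hq1]; exact List.mem_cons_of_mem _ hx) e heT0
    exact hw q (List.mem_cons_of_mem _ hq) (by rw [hq1]; exact List.cons_prefix_cons.mpr ⟨rfl, hqtw⟩)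

theorem trA_append (a b : List Char) : translateA (a ++ b) = translateA a ++ translateA b := by
  simp [translateA]

theorem trA_cons (c : Char) (s : List Char) :
    translateA (c :: s) = (finalsA.lookup c).getD [c] ++ translateA s := by
  simp [translateA]

theorem trA_values (v : List Char) (hv : ∀ c ∈ v, finalsA.lookup c = none) : translateA v = v := by
  induction v with
  | nil => rfl
  | cons c v ih =>
    rw [trA_cons, hv c List.mem_cons_self, ih (fun x hx => hv x (List.mem_cons_of_mem _ hx))]
    rfl

-- small association-list facts (List.lookup has no such lemmas in scope)
theorem lookup_mem {l : List (List Char × List Char)} {k v : List Char}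
    (h : l.lookup k = some v) : (k, v) ∈ l := by
  induction l with
  | nil => simp [List.lookup] at h
  | cons e l ih =>
    obtain ⟨e1, e2⟩ := e
    by_cases hk : k = e1
    · subst hk
      simp [List.lookup] at h
      simp [h]
    · rw [List.lookup, beq_eq_false_iff_ne.mpr hk] at h
      exact List.mem_cons_of_mem _ (ih h)

theorem lookup_none {l : List (List Char × List Char)} {k v : List Char}
    (h : l.lookup k = none) (hm : (k, v) ∈ l) : False := by
  induction l with
  | nil => cases hm
  | cons e l ih =>
    obtain ⟨e1, e2⟩ := e
    by_cases hk : k = e1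
    · subst hk; simp [List.lookup] at h
    · rw [List.lookup, beq_eq_false_iff_ne.mpr hk] at h
      rcases List.mem_cons.mp hm with heq | hm'
      · exact hk (by cases heq; rfl)
      · exact ih h hm'

-- lookup commutes with mapping the values of an association list
theorem lookup_mapval {β γ : Type} (f : β → γ) (l : List (Char × β)) (c : Char) :
    (l.map (fun p => (p.1, f p.2))).lookup c = (l.lookup c).map f := by
  induction l with
  | nil => rfl
  | cons e l ih =>
    rw [List.map_cons, List.lookup, List.lookup]
    by_cases hk : c == e.1
    · rw [hk]; rfl
    · rw [Bool.eq_false_iff.mpr hk]; simpa using ih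

-- B's finals, with the kana strings exploded to char lists, are exactly A's finals table
theorem finalsB_toList : finalsB.map (fun p => (p.1, String.toList p.2)) = finalsA := by rfl

theorem finals_agree (c : Char) :
    (((finalsB.lookup c).map String.toList).getD [c]) = (finalsA.lookup c).getD [c] := by
  rw [← finalsB_toList, lookup_mapval]

-- decidable facts about the concrete tables (proved through Bool evaluation)
set_option maxRecDepth 8000 in
theorem tblA_pw : List.Pairwise (fun a b => NoStraddle a.1 b.1) tblA := by
  unfold NoStraddle; decide

set_option maxRecDepth 8000 in
theorem tblA_NN : NN tblA := by
  intro e he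
  have h : tblA.all (fun e => !e.1.isEmpty && !e.2.isEmpty) = true := by decide
  have := List.all_eq_true.mp h e he
  simp only [Bool.and_eq_true, Bool.not_eq_true', List.isEmpty_eq_false_iff] at this
  exact this

set_option maxRecDepth 8000 in
theorem tblA_VH : VH tblA := by
  intro e he c hc e' he'
  have h : tblA.all (fun e => e.2.all (fun ch => tblA.all (fun e' => e'.1.head? != some ch))) = true := by
    decide
  have h1 := List.all_eq_true.mp (List.all_eq_true.mp (List.all_eq_true.mp h e he) c hc) e' he'
  simpa using h1

set_option maxRecDepth 8000 in
theorem tblA_PV : PV tblA := by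
  intro e he c hc e' he'
  have h : tblA.all (fun e => e.1.all (fun ch => tblA.all (fun e' => !e'.2.contains ch))) = true := by
    decide
  have h1 := List.all_eq_true.mp (List.all_eq_true.mp (List.all_eq_true.mp h e he) c hc) e' he'
  simpa using h1

set_option maxRecDepth 8000 in
theorem tblA_VF : VF tblA := by
  intro e he c hc
  have h : tblA.all (fun e => e.2.all (fun ch => (finalsA.lookup ch).isNone)) = true := by decide
  have h1 := List.all_eq_true.mp (List.all_eq_true.mp h e he) c hc
  simpa [Option.isNone_iff_eq_none] using h1

set_option maxRecDepth 8000 in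
theorem tblB_sub : ∀ e ∈ tblB, e ∈ tblA := by
  intro e he
  have h : tblB.all (fun e => tblA.contains e) = true := by decide
  have h1 := List.all_eq_true.mp h e he
  simpa using h1

set_option maxRecDepth 8000 in
theorem tblA_sub : ∀ e ∈ tblA, e ∈ tblB := by
  intro e he
  have h : tblA.all (fun e => tblB.contains e) = true := by decide
  have h1 := List.all_eq_true.mp h e he
  simpa using h1

set_option maxRecDepth 8000 in
theorem tblA_len : ∀ e ∈ tblA, e.1.length = 1 ∨ e.1.length = 2 ∨ e.1.length = 3 := by
  intro e he
  have h : tblA.all (fun e => e.1.length == 1 || e.1.length == 2 || e.1.length == 3) = true := by decide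
  have h1 := List.all_eq_true.mp h e he
  simp at h1
  tauto

theorem main_scan : ∀ s : List Char, translateA (FR tblA s) = scanB s := by
  intro s
  induction s using scanB.induct with
  | case1 =>
    rw [FR_nil, scanB.eq_def]
    rfl
  | case2 c rest v h3 ih =>
    have hm := tblB_sub _ (lookup_mem h3)
    have hsplit := List.take_append_drop 3 (c :: rest)
    rw [scanB.eq_def]
    simp only [h3]
    conv_lhs => rw [← hsplit]
    rw [FR_fire tblA _ _ tblA_pw tblA_NN tblA_VH hm, trA_append,
      trA_values v (fun x hx => tblA_VF _ hm x hx)]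
    rw [show (c :: rest).drop 3 = rest.drop 2 from rfl, ih]
  | case3 c rest h3 v h2 ih =>
    have hm := tblB_sub _ (lookup_mem h2)
    have hsplit := List.take_append_drop 2 (c :: rest)
    rw [scanB.eq_def]
    simp only [h3, h2]
    conv_lhs => rw [← hsplit]
    rw [FR_fire tblA _ _ tblA_pw tblA_NN tblA_VH hm, trA_append,
      trA_values v (fun x hx => tblA_VF _ hm x hx)]
    rw [show (c :: rest).drop 2 = rest.drop 1 from rfl, ih]
  | case4 c rest h3 h2 v h1 ih =>
    have hm := tblB_sub _ (lookup_mem h1)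
    have hsplit := List.take_append_drop 1 (c :: rest)
    rw [scanB.eq_def]
    simp only [h3, h2, h1]
    conv_lhs => rw [← hsplit]
    rw [FR_fire tblA _ _ tblA_pw tblA_NN tblA_VH hm, trA_append,
      trA_values v (fun x hx => tblA_VF _ hm x hx)]
    rw [show (c :: rest).drop 1 = rest from rfl, ih]
  | case5 c rest h3 h2 h1 ih =>
    have hw : ∀ e ∈ tblA, ¬ e.1 <+: (c :: rest) := by
      intro e he hp
      have hB := tblA_sub e he
      have htake := List.prefix_iff_eq_take.mp hp
      rcases tblA_len e he with hL | hL | hL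
      · exact lookup_none (by rwa [← hL, ← htake] at h1) hB
      · exact lookup_none (by rwa [← hL, ← htake] at h2) hB
      · exact lookup_none (by rwa [← hL, ← htake] at h3) hB
    rw [scanB.eq_def]
    simp only [h3, h2, h1]
    rw [FR_fallback tblA tblA_NN tblA_PV c tblA (fun e he => he) rest hw]
    rw [trA_cons, ih, finals_agree]

theorem repStage_FR (st : List (List Char × List Char)) (h : NN st) :
    ∀ s, repStage s st = FR st s := by
  induction st with
  | nil => intro s; rfl
  | cons e st ih =>
    intro s
    rw [repStage, FR_cons, List.foldl_cons,
      replace_eq_repc e.1 e.2 s (h e List.mem_cons_self).1]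
    exact ih (fun e' he' => h e' (List.mem_cons_of_mem _ he')) (repc e.1 e.2 s)

theorem chain_eq (m : List Char) :
    PySem.Chars.replace
      (repStage (repStage (repStage (repStage (repStage (repStage (repStage (repStage (repStage
       (repStage (repStage (repStage (repStage (repStage (repStage m stA0) stA1) stA2) stA3) stA4)
       stA5) stA6) stA7) stA8) stA9) stA10) stA11) stA12) stA13) stA14) [' '] ['・'] =
    FR tblA m := by
  rw [repStage_FR stA0 (by unfold NN; decide), repStage_FR stA1 (by unfold NN; decide),
    repStage_FR stA2 (by unfold NN; decide), repStage_FR stA3 (by unfold NN; decide),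
    repStage_FR stA4 (by unfold NN; decide), repStage_FR stA5 (by unfold NN; decide),
    repStage_FR stA6 (by unfold NN; decide), repStage_FR stA7 (by unfold NN; decide),
    repStage_FR stA8 (by unfold NN; decide), repStage_FR stA9 (by unfold NN; decide),
    repStage_FR stA10 (by unfold NN; decide), repStage_FR stA11 (by unfold NN; decide),
    repStage_FR stA12 (by unfold NN; decide), repStage_FR stA13 (by unfold NN; decide),
    repStage_FR stA14 (by unfold NN; decide),
    replace_eq_repc [' '] ['・'] _ (by simp),
    show ∀ s, repc [' '] ['・'] s = FR [([' '],['・'])] s from fun s => rfl,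
    tblA]
  simp only [FR_append]

-- ===== VERDICT (by name: the statement is the Claim_ definition above) =====
theorem toKatakana_spec : Claim_equal_toKatakana := by
  unfold Claim_equal_toKatakana
  intro text _
  unfold Spec_toKatakana toKatakana toKatakana_alt
  dsimp only
  refine congrArg (fun z => String.ofList (PySem.Chars.replace z ['\\'] [])) ?_
  rw [chain_eq, main_scan]
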